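-- pv_equiv track=rewrite | github.com/jorzel/codefights | arcade/core/gravitation.py | gravitation
-- ===== SOURCE A (Python) =====
-- def gravitation(rows):
--     memo = {}
--     for i, line in enumerate(zip(*rows)):
--         for element in line:
--             if i not in memo and element == '#':
--                 memo[i] = 0
--             if i in memo and element != '#':
--                 memo[i] += 1
--         if i not in memo:
--             memo[i] = 0
--     _sorted = sorted(memo.items(), key=lambda x: x[1])
--     return [x[0] for x in _sorted if x[1] == _sorted[0][1]]
-- ===== SOURCE B (Python) =====
-- def gravitation(rows):
--     # Row-major single sweep: per column keep (row of first '#', total '#'); the gap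
--     # count is then n - first - total by arithmetic, with no scan below the top block.
--     if not rows:
--         return []
--     n = len(rows)
--     state = [(None, 0)] * min(len(r) for r in rows)
--     for i, row in enumerate(rows):
--         state = [
--             (first if first is not None else (i if ch == '#' else None),
--              total + (1 if ch == '#' else 0))
--             for (first, total), ch in zip(state, row)
--         ]
--     counts = [0 if first is None else n - first - total for first, total in state]
--     if not counts:
--         return []
--     m = min(counts)
--     return [j for j, c in enumerate(counts) if c == m]
-- ===== Notes on version B (the rewrite author's own statement) =====
-- stated objective: alternative
-- what changed: B replaces A's column-wise stateful flag-and-count scan plus sort-then-take-minimum-prefix with a single row-major sweep that records per column only (first row containing '#', total number of '#') and derives each gap count arithmetically as n - first - total, then a direct min and an index-order filter (no transpose scan below the block, no dict, no sort).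
import Mathlib
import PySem

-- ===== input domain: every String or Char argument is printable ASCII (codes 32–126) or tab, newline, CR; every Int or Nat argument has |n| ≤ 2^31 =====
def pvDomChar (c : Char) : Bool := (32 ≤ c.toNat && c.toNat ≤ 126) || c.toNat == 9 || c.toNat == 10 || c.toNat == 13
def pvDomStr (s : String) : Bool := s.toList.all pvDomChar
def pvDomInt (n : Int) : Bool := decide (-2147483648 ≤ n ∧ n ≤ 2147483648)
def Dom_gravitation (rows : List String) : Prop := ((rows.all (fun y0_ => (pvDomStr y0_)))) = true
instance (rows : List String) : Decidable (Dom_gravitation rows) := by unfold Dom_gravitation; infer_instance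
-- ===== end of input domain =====

-- B replaces A's column-wise stateful flag-and-counter plus sort with a single row-major sweep that
-- records, per column, the first row holding '#' and the total number of '#', and derives each gap
-- count arithmetically as n - first - total; then a direct min and an index filter. Return values only.

-- A-side helper: Python's zip(*rows) — the columns of the rows, truncated to the shortest row
-- (hand-ported, exact: zip() of no iterables and zip containing an empty row both yield no tuples)
def pyZipStar (rows : List String) : List (List Char) :=
  let ls := rows.map String.toList
  match (ls.map List.length).min? with
  | none => []
  | some n => (List.range n).map (fun j => ls.map (fun r => r.getD j ' '))

-- ===== PORT A =====
-- inner loop body of A: one element of the current column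
def aInner (i : Int) (memo : PySem.Dict Int Int) (element : Char) : PySem.Dict Int Int :=
  let memo := if !(memo.contains i) && (element == '#') then memo.insert i 0 else memo
  -- 'memo[i] += 1' under the guard 'i in memo': exact as Dict.modify (the key is present)
  if memo.contains i && !(element == '#') then memo.modify i 0 (· + 1) else memo

-- outer loop body of A: one (i, line) of enumerate(zip(*rows))
def aStep (memo : PySem.Dict Int Int) (p : Int × List Char) : PySem.Dict Int Int :=
  let memo := p.2.foldl (aInner p.1) memo
  if !(memo.contains p.1) then memo.insert p.1 0 else memo

def gravitation (rows : List String) : List Int :=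
  let memo := (PySem.List.enumerate (pyZipStar rows) 0).foldl aStep PySem.Dict.empty
  let s := PySem.List.sorted memo.items (fun x => x.2) false
  -- '[x[0] for x in _sorted if x[1] == _sorted[0][1]]': _sorted[0] is only read when _sorted ≠ []
  match s with
  | [] => []
  | h :: t => ((h :: t).filter (fun x => x.2 == h.2)).map (fun x => x.1)

-- ===== PORT B =====
-- one row of B's sweep: zip(state, row) keeps the first len(state) cells of the row
def bStep (i : Int) (st : List (Option Int × Int)) (row : List Char) : List (Option Int × Int) :=
  (st.zip row).map (fun q =>
    ((match q.1.1 with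
      | some f => some f
      | none => if q.2 == '#' then some i else none),
     q.1.2 + (if q.2 == '#' then 1 else 0)))

def gravitation_alt (rows : List String) : List Int :=
  match rows with
  | [] => []
  | _ :: _ =>
    let n : Int := rows.length
    -- min(len(r) for r in rows): rows is nonempty here, so the min exists (the getD is unreachable)
    let w : Nat := ((rows.map (fun r => r.toList.length)).min?).getD 0
    let state := (PySem.List.enumerate rows 0).foldl
      (fun st p => bStep p.1 st p.2.toList)
      (List.replicate w ((none : Option Int), (0 : Int)))
    let counts := state.map (fun q =>
      match q.1 with
      | none => (0 : Int)
      | some f => n - f - q.2)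
    match counts with
    | [] => []
    | _ :: _ =>
      match PySem.List.min? counts (fun c => c) with
      | none => []   -- unreachable: counts ≠ []
      | some m => ((PySem.List.enumerate counts 0).filter (fun p => p.2 == m)).map (fun p => p.1)

-- ===== PRECONDITION & SPEC =====
def Spec_gravitation (rows : List String) (out : List Int) : Prop := out = gravitation_alt rows
instance (rows : List String) (out : List Int) : Decidable (Spec_gravitation rows out) := by unfold Spec_gravitation; infer_instance

-- ===== CLAIM (what is proved, stated in full; the proofs are below) =====
def Claim_equal_gravitation : Prop := ∀ (rows : List String), Dom_gravitation rows → Spec_gravitation rows (gravitation rows)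

-- ===== LEMMAS AND PROOFS =====

-- proof-side: the number of gaps below the topmost block of one column, as A computes it
def gapCount (col : List Char) : Int :=
  if col.contains '#' then
    match PySem.List.index? col '#' with
    | some start =>
        ((PySem.List.slice col (some ((start : Int) + 1)) none).countP (fun c => !(c == '#')) : Int)
    | none => 0   -- unreachable: '#' ∈ col
  else 0

-- proof-side canonical result: indices of the minimal entries of counts, in order
def canon (counts : List Int) : List Int :=
  match PySem.List.min? counts (fun c => c) with
  | none => []
  | some m => ((PySem.List.enumerate counts 0).filter (fun p => p.2 == m)).map (fun p => p.1)

-- ---------- A side ----------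

-- phase 0 of A's inner loop: before any '#' is seen, memo is untouched
lemma aInner_phase0 (i : Int) (pre : List Char) (d : PySem.Dict Int Int)
    (hpre : '#' ∉ pre) (hd : d.contains i = false) :
    pre.foldl (aInner i) d = d := by
  induction pre with
  | nil => rfl
  | cons c cs ih =>
    simp only [List.mem_cons, not_or] at hpre
    have hc : (c == '#') = false := by simpa [beq_iff_eq] using (Ne.symm hpre.1)
    simp only [List.foldl_cons]
    have : aInner i d c = d := by simp [aInner, hc, hd]
    rw [this]; exact ih hpre.2

-- phase 1 of A's inner loop: once i ∈ memo, each non-'#' cell bumps the stored count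
lemma aInner_phase1 (i : Int) (suf : List Char) (d0 : PySem.Dict Int Int) (k : Int) :
    suf.foldl (aInner i) (d0.insert i k) = d0.insert i (k + (suf.countP (fun c => !(c == '#')) : Int)) := by
  induction suf generalizing k with
  | nil => simp
  | cons c cs ih =>
    simp only [List.foldl_cons]
    have hcont : (d0.insert i k).contains i = true := PySem.Dict.contains_insert_self d0 i k
    by_cases hc : c = '#'
    · have : aInner i (d0.insert i k) c = d0.insert i k := by
        simp [aInner, hc, hcont]
      rw [this, ih k]
      simp [hc]
    · have : aInner i (d0.insert i k) c = d0.insert i (k + 1) := by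
        simp [aInner, hc, hcont, PySem.Dict.modify, PySem.Dict.getD_insert_self,
          PySem.Dict.insert_insert_self]
      rw [this, ih (k + 1)]
      congr 1
      simp [hc]
      ring

-- one outer step on a fresh column index i is exactly 'insert i (gapCount col)'
lemma aStep_eq (d : PySem.Dict Int Int) (i : Int) (col : List Char)
    (hd : d.contains i = false) :
    aStep d (i, col) = d.insert i (gapCount col) := by
  by_cases hmem : '#' ∈ col
  · obtain ⟨s, hs⟩ := (PySem.List.index?_isSome_iff col '#').2 hmem |> Option.isSome_iff_exists.1
    obtain ⟨pre, suf, hcol, hlen, hnp⟩ := (PySem.List.index?_eq_some_iff col '#' s).1 hs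
    have hfold : col.foldl (aInner i) d = d.insert i (0 + (suf.countP (fun c => !(c == '#')) : Int)) := by
      subst hcol
      rw [List.foldl_append, aInner_phase0 i pre d hnp hd, List.foldl_cons]
      have h1 : aInner i d '#' = d.insert i 0 := by
        simp [aInner, hd]
      rw [h1, aInner_phase1 i suf d 0]
    have hslice : PySem.List.slice col (some ((s : Int) + 1)) none = suf := by
      have : ((s : Int) + 1) = ((s + 1 : Nat) : Int) := by push_cast; ring
      rw [this, PySem.List.slice_from_natCast]
      subst hcol hlen
      simp [List.drop_append]
    simp only [aStep, hfold, gapCount]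
    have hmem' : col.contains '#' = true := by simpa using hmem
    rw [hmem']
    rw [hs]
    simp [hslice, PySem.Dict.contains_insert_self]
  · have h0 : col.foldl (aInner i) d = d := aInner_phase0 i col d hmem hd
    simp [aStep, h0, hd, gapCount, hmem]

-- the whole outer loop appends (index, gapCount) pairs in column order
lemma aOuter (cols : List (List Char)) (s : Int) (d : PySem.Dict Int Int)
    (hfresh : ∀ j : Int, s ≤ j → d.contains j = false) :
    ((PySem.List.enumerate cols s).foldl aStep d).items
      = d.items ++ (PySem.List.enumerate cols s).map (fun p => (p.1, gapCount p.2)) := by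
  induction cols generalizing s d with
  | nil => simp [PySem.List.enumerate_nil]
  | cons c cs ih =>
    rw [PySem.List.enumerate_cons]
    simp only [List.foldl_cons, List.map_cons]
    have hds : d.contains s = false := hfresh s le_rfl
    have h1 : aStep d (s, c) = d.insert s (gapCount c) := aStep_eq d s c hds
    rw [h1, ih (s + 1) _ (fun j hj => by
      rw [PySem.Dict.contains_insert]
      have : (j == s) = false := by simp; omega
      rw [this, Bool.false_or]
      exact hfresh j (by omega))]
    rw [PySem.Dict.items_insert_of_not_contains d _ hds]
    simp

-- stability at the minimum: inserting x into a sorted list of keys ≥ c keeps the c-filter's order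
lemma filter_insertBy_min (x : Int × Int) (acc : List (Int × Int)) (c : Int)
    (hall : ∀ y ∈ acc, c ≤ y.2) (hs : acc.Pairwise (fun a b => a.2 ≤ b.2)) :
    (PySem.List.insertBy (fun a b => decide (a.2 < b.2)) x acc).filter (fun y => y.2 == c)
      = acc.filter (fun y => y.2 == c) ++ (if x.2 == c then [x] else []) := by
  induction acc with
  | nil =>
    by_cases hxc : x.2 = c <;> simp [PySem.List.insertBy, hxc]
  | cons y ys ih =>
    rw [List.pairwise_cons] at hs
    by_cases hlt : x.2 < y.2
    · have hin : PySem.List.insertBy (fun a b => decide (a.2 < b.2)) x (y :: ys) = x :: y :: ys := by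
        simp [PySem.List.insertBy, hlt]
      rw [hin]
      by_cases hxc : x.2 = c
      · have hyc : ∀ z ∈ y :: ys, ¬ ((z.2 == c) = true) := by
          intro z hz
          rcases List.mem_cons.1 hz with rfl | hz'
          · simp; omega
          · have := hs.1 z hz'; simp; omega
        rw [List.filter_cons_of_pos (by simp [hxc]),
          List.filter_eq_nil_iff.2 hyc]
        simp [hxc]
      · rw [List.filter_cons_of_neg (by simp [hxc])]
        simp [hxc]
    · have hin : PySem.List.insertBy (fun a b => decide (a.2 < b.2)) x (y :: ys) =
        y :: PySem.List.insertBy (fun a b => decide (a.2 < b.2)) x ys := by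
        simp [PySem.List.insertBy, hlt]
      rw [hin, List.filter_cons, List.filter_cons,
        ih (fun z hz => hall z (List.mem_cons_of_mem y hz)) hs.2]
      by_cases hyc : (y.2 == c) = true <;> simp [hyc]

-- filtering the minimal-key elements out of sorted(l, key=snd) gives them in original order
lemma filter_min_sorted (l : List (Int × Int)) (c : Int) (hall : ∀ y ∈ l, c ≤ y.2) :
    (PySem.List.sorted l (fun y => y.2) false).filter (fun y => y.2 == c)
      = l.filter (fun y => y.2 == c) := by
  induction l using List.reverseRecOn with
  | nil => rfl
  | append_singleton l x ih =>
    have hstep : PySem.List.sorted (l ++ [x]) (fun y => y.2) false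
        = PySem.List.insertBy (fun a b => decide (a.2 < b.2)) x (PySem.List.sorted l (fun y => y.2) false) := by
      rw [PySem.List.sorted_eq_foldl_insertBy, PySem.List.sorted_eq_foldl_insertBy,
        List.foldl_append]
      rfl
    rw [hstep, filter_insertBy_min x _ c
      (fun y hy => hall y ((PySem.List.mem_sorted l _ false y).1 hy |> List.mem_append_left [x]))
      (PySem.List.sorted_pairwise l (fun y => y.2)),
      ih (fun y hy => hall y (List.mem_append_left [x] hy)), List.filter_append]
    by_cases hxc : (x.2 == c) = true <;> simp [hxc]

lemma enumerate_map {α β : Type} (f : α → β) (xs : List α) (s : Int) :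
    PySem.List.enumerate (xs.map f) s = (PySem.List.enumerate xs s).map (fun p => (p.1, f p.2)) := by
  induction xs generalizing s with
  | nil => rfl
  | cons x xs ih => simp [PySem.List.enumerate_cons, ih]

-- A reduces to the canonical min-filter over the per-column gap counts
lemma A_eq_canon (rows : List String) :
    gravitation rows = canon ((pyZipStar rows).map gapCount) := by
  unfold gravitation
  show (match PySem.List.sorted ((PySem.List.enumerate (pyZipStar rows) 0).foldl aStep PySem.Dict.empty).items (fun x => x.2) false with
    | [] => ([] : List Int)
    | h :: t => ((h :: t).filter (fun x : Int × Int => x.2 == h.2)).map (fun x : Int × Int => x.1))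
    = canon ((pyZipStar rows).map gapCount)
  unfold canon
  have hitems : ((PySem.List.enumerate (pyZipStar rows) 0).foldl aStep PySem.Dict.empty).items
      = PySem.List.enumerate ((pyZipStar rows).map gapCount) 0 := by
    rw [aOuter (pyZipStar rows) 0 PySem.Dict.empty (fun j _ => PySem.Dict.contains_empty j),
      enumerate_map]
    simp [PySem.Dict.empty]
  rw [hitems]
  set counts := (pyZipStar rows).map gapCount with hcounts
  cases hmin : PySem.List.min? counts (fun c => c) with
  | none =>
    have : counts = [] := (PySem.List.min?_eq_none_iff counts _).1 hmin
    rw [this]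
    rfl
  | some m =>
    have hm_mem : m ∈ counts := PySem.List.min?_mem hmin
    have hm_min : ∀ v ∈ counts, m ≤ v := PySem.List.min?_isMin hmin
    have hne : PySem.List.enumerate counts 0 ≠ [] := by
      intro h
      have := PySem.List.length_enumerate counts (0 : Int)
      rw [h] at this
      simp at this
      rw [List.eq_nil_of_length_eq_zero this.symm] at hm_mem
      exact (List.not_mem_nil) hm_mem
    cases hsort : PySem.List.sorted (PySem.List.enumerate counts 0) (fun x => x.2) false with
    | nil =>
      exact absurd ((PySem.List.sorted_eq_nil_iff _ _ _).1 hsort) hne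
    | cons h t =>
      have hhead : ∀ y ∈ PySem.List.enumerate counts 0, h.2 ≤ y.2 :=
        PySem.List.key_head_sorted_le _ _ hsort
      have hh_mem : h ∈ PySem.List.enumerate counts 0 := by
        rw [← PySem.List.mem_sorted _ (fun x => x.2) false, hsort]
        exact List.mem_cons_self
      have hsnd : h.2 ∈ counts := by
        have := List.mem_map_of_mem (f := fun p : Int × Int => p.2) hh_mem
        rwa [PySem.List.map_snd_enumerate] at this
      have hmh : m = h.2 := by
        have h1 : m ≤ h.2 := hm_min _ hsnd
        have h2 : h.2 ≤ m := by
          obtain ⟨y, hy, hy2⟩ := List.mem_map.1 (by rw [PySem.List.map_snd_enumerate]; exact hm_mem :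
            m ∈ (PySem.List.enumerate counts 0).map (fun p : Int × Int => p.2))
          rw [← hy2]
          exact hhead y hy
        omega
      have hfilt : (h :: t).filter (fun x => x.2 == h.2)
          = (PySem.List.enumerate counts 0).filter (fun y => y.2 == h.2) := by
        rw [← hsort, filter_min_sorted _ _ hhead]
      show ((h :: t).filter (fun x : Int × Int => x.2 == h.2)).map (fun x : Int × Int => x.1)
        = ((PySem.List.enumerate counts 0).filter (fun p : Int × Int => p.2 == m)).map (fun p : Int × Int => p.1)
      rw [hfilt, hmh]

-- ---------- B side ----------

-- column j of a list of rows (rows at least j+1 long; getD is the safe read)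
def colOf (ls : List (List Char)) (j : Nat) : List Char := ls.map (fun r => r.getD j ' ')

-- the per-column summary B's sweep maintains, expressed over a whole column
def combine (p : Option Int × Int) (s : Int) (col : List Char) : Option Int × Int :=
  ((match p.1 with
    | some f => some f
    | none => (PySem.List.index? col '#').map (fun k : Nat => s + (k : Int))),
   p.2 + (col.countP (fun c => c == '#') : Int))

lemma combine_nil (p : Option Int × Int) (s : Int) : combine p s [] = p := by
  cases p with
  | mk f t => cases f <;> simp [combine, PySem.List.index?]

lemma bFold (ls : List (List Char)) (s : Int) (st : List (Option Int × Int))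
    (h : ∀ row ∈ ls, st.length ≤ row.length) :
    (PySem.List.enumerate ls s).foldl (fun a p => bStep p.1 a p.2) st
      = (List.range st.length).map (fun j => combine (st.getD j (none, 0)) s (colOf ls j)) := by
  induction ls generalizing s st with
  | nil =>
    simp only [PySem.List.enumerate_nil, List.foldl_nil]
    apply List.ext_getElem
    · simp
    · intro j h1 h2
      simp [combine_nil, colOf, List.getD_eq_getElem?_getD, List.getElem?_eq_getElem h1]
  | cons r rs ih =>
    rw [PySem.List.enumerate_cons]
    simp only [List.foldl_cons]
    have hr : st.length ≤ r.length := h r (List.mem_cons_self)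
    have hlen1 : (bStep s st r).length = st.length := by
      simp [bStep, List.length_zip]; omega
    rw [ih (s + 1) (bStep s st r) (by
      intro row hrow
      rw [hlen1]
      exact h row (List.mem_cons_of_mem r hrow))]
    rw [hlen1]
    apply List.map_congr_left
    intro j hj
    have hjlt : j < st.length := List.mem_range.1 hj
    have hjr : j < r.length := lt_of_lt_of_le hjlt hr
    have hget1 : (bStep s st r).getD j (none, 0)
        = ((match (st.getD j (none, 0)).1 with
            | some f => some f
            | none => if r.getD j ' ' == '#' then some s else none),
           (st.getD j (none, 0)).2 + (if r.getD j ' ' == '#' then 1 else 0)) := by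
      have hjz : j < (st.zip r).length := by simp [List.length_zip]; omega
      rw [List.getD_eq_getElem _ _ (by rw [hlen1]; exact hjlt)]
      simp only [bStep, List.getElem_map, List.getElem_zip]
      rw [List.getD_eq_getElem _ _ hjlt, List.getD_eq_getElem _ _ hjr]
    rw [hget1]
    have hcol : colOf (r :: rs) j = r.getD j ' ' :: colOf rs j := by
      simp [colOf]
    rw [hcol]
    rw [Prod.ext_iff]
    refine ⟨?_, ?_⟩
    · -- first components: the first row index with '#'
      simp only [combine]
      cases hp : (st.getD j (none, 0)).1 with
      | some f => simp
      | none =>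
        by_cases hch : r.getD j ' ' = '#'
        · rw [hch]
          simp only [PySem.List.index?_cons_self]
          simp
        · rw [PySem.List.index?_cons_of_ne _ hch]
          have hch0 : (r.getD j ' ' == '#') = false := by simpa using hch
          rw [hch0]
          cases PySem.List.index? (colOf rs j) '#' with
          | none => simp
          | some k =>
            simp only [Option.map_some, if_false, Bool.false_eq_true]
            simp
            ring
    · -- second components: the running count of '#'
      simp only [combine, List.countP_cons]
      split_ifs
      all_goals simp
      all_goals ring
    -- end pointwise case

-- the arithmetic identity: gaps below the top block = length - first-index - number of blocks
lemma countP_hash_split (l : List Char) :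
    l.length = l.countP (fun c => c == '#') + l.countP (fun c => !(c == '#')) := by
  induction l with
  | nil => rfl
  | cons a t ih =>
    cases ha : (a == '#')
    · simp [ha]
      omega
    · simp [ha]
      omega

lemma gap_formula (col : List Char) :
    (match (PySem.List.index? col '#').map (fun k : Nat => (0 : Int) + (k : Int)) with
     | none => (0 : Int)
     | some f => (col.length : Int) - f - ((0 : Int) + (col.countP (fun c => c == '#') : Int)))
      = gapCount col := by
  cases hidx : PySem.List.index? col '#' with
  | none =>
    have hnm : '#' ∉ col := (PySem.List.index?_eq_none_iff col '#').1 hidx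
    have hcf : col.contains '#' = false := by simpa using hnm
    unfold gapCount
    rw [hcf]
    rfl
  | some k =>
    obtain ⟨pre, suf, hcol, hlen, hnp⟩ := (PySem.List.index?_eq_some_iff col '#' k).1 hidx
    have hmem : '#' ∈ col := by rw [hcol]; simp
    have hcont : col.contains '#' = true := by simpa using hmem
    have hslice : PySem.List.slice col (some ((k : Int) + 1)) none = suf := by
      have : ((k : Int) + 1) = ((k + 1 : Nat) : Int) := by push_cast; ring
      rw [this, PySem.List.slice_from_natCast]
      rw [hcol, ← hlen]
      simp [List.drop_append]
    have hcp : col.countP (fun c => c == '#') = 1 + suf.countP (fun c => c == '#') := by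
      have hpre : pre.countP (fun c => c == '#') = 0 := by
        rw [List.countP_eq_zero]
        intro c hc
        simp [beq_iff_eq]
        intro hcc
        exact hnp (hcc ▸ hc)
      rw [hcol]
      simp [List.countP_append, hpre]
      omega
    have hsplit : suf.length = suf.countP (fun c => c == '#') + suf.countP (fun c => !(c == '#')) :=
      countP_hash_split suf
    have hlcol : col.length = pre.length + 1 + suf.length := by
      rw [hcol]; simp; omega
    unfold gapCount
    rw [hcont, if_pos rfl, hidx]
    simp only [Option.map_some]
    rw [hslice, hcp, hlcol, ← hlen]
    have hs' : (suf.length : Int) = (suf.countP (fun c => c == '#') : Int) + (suf.countP (fun c => !(c == '#')) : Int) := by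
      exact_mod_cast hsplit
    push_cast
    linarith [hs']

-- B reduces to the same canonical form
lemma B_eq_canon (rows : List String) :
    gravitation_alt rows = canon ((pyZipStar rows).map gapCount) := by
  cases rows with
  | nil => rfl
  | cons r0 rs0 =>
    show (let n : Int := ((r0 :: rs0 : List String)).length
      let w : Nat := (((r0 :: rs0 : List String).map (fun r => r.toList.length)).min?).getD 0
      let state := (PySem.List.enumerate (r0 :: rs0 : List String) 0).foldl
        (fun st p => bStep p.1 st p.2.toList)
        (List.replicate w ((none : Option Int), (0 : Int)))
      let counts := state.map (fun q =>
        match q.1 with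
        | none => (0 : Int)
        | some f => n - f - q.2)
      match counts with
      | [] => ([] : List Int)
      | _ :: _ =>
        match PySem.List.min? counts (fun c => c) with
        | none => []
        | some m => ((PySem.List.enumerate counts 0).filter (fun p => p.2 == m)).map (fun p => p.1))
      = canon ((pyZipStar (r0 :: rs0)).map gapCount)
    simp only []
    set rws : List String := r0 :: rs0 with hrws
    set ls := rws.map String.toList with hls
    have hlens : rws.map (fun r => r.toList.length) = ls.map List.length := by
      rw [hls, List.map_map]; rfl
    obtain ⟨w, hw⟩ : ∃ w, (ls.map List.length).min? = some w := by
      cases hmm : (ls.map List.length).min? with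
      | none =>
        have := List.min?_eq_none_iff.1 hmm
        rw [hls, hrws] at this
        simp at this
      | some w => exact ⟨w, rfl⟩
    have hwmin : ∀ row ∈ ls, w ≤ row.length := by
      intro row hrow
      exact (List.min?_eq_some_iff.1 hw).2 _ (List.mem_map_of_mem hrow)
    have hwd : ((rws.map (fun r => r.toList.length)).min?).getD 0 = w := by
      rw [hlens, hw]; rfl
    rw [hwd]
    have hfoldmap :
        (PySem.List.enumerate rws 0).foldl (fun st p => bStep p.1 st p.2.toList)
            (List.replicate w ((none : Option Int), (0 : Int)))
          = (PySem.List.enumerate ls 0).foldl (fun st p => bStep p.1 st p.2)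
            (List.replicate w ((none : Option Int), (0 : Int))) := by
      rw [hls, enumerate_map, List.foldl_map]
    rw [hfoldmap, bFold ls 0 _ (by simpa using hwmin)]
    simp only [List.length_replicate]
    have hzip : pyZipStar rws = (List.range w).map (fun j => colOf ls j) := by
      show (match (ls.map List.length).min? with
        | none => ([] : List (List Char))
        | some n => (List.range n).map (fun j => ls.map (fun r => r.getD j ' ')))
        = (List.range w).map (fun j => colOf ls j)
      rw [hw]
      rfl
    have hcounts :
        ((List.range w).map (fun j => combine (List.getD (List.replicate w ((none : Option Int), (0:Int))) j (none, 0)) 0 (colOf ls j))).map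
          (fun q => match q.1 with | none => (0 : Int) | some f => (rws.length : Int) - f - q.2)
        = (pyZipStar rws).map gapCount := by
      rw [hzip, List.map_map, List.map_map]
      apply List.map_congr_left
      intro j hj
      have hjw : j < w := List.mem_range.1 hj
      have hgd : List.getD (List.replicate w ((none : Option Int), (0:Int))) j (none, 0) = (none, 0) := by
        rw [List.getD_eq_getElem _ _ (by simpa using hjw)]
        simp
      have hcollen : (colOf ls j).length = rws.length := by
        simp [colOf, hls]
      simp only [Function.comp, hgd, combine]
      rw [← hcollen]
      exact gap_formula (colOf ls j)
    rw [hcounts]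
    cases hcc : (pyZipStar rws).map gapCount with
    | nil => rfl
    | cons c cs => rfl

-- ===== VERDICT (by name: the statement is the Claim_ definition above) =====
theorem gravitation_spec : Claim_equal_gravitation := by
  intro rows _
  show gravitation rows = gravitation_alt rows
  rw [A_eq_canon, B_eq_canon]
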